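-- pv_equiv track=rewrite | github.com/aehmttw/Tanks | fix-style.py | mask_literals
-- ===== SOURCE A (Python) =====
-- def mask_literals(text: str) -> str:
--     """
--     Return a copy of *text* with the same length where every character
--     inside a string literal, char literal, line comment, or block comment
--     is replaced with a space.  Newlines are always preserved so that line
--     numbers stay consistent with the original.
--
--     This lets whitespace fixers work on the masked copy to find positions
--     of interest, then apply changes to the original text.
--     """
--     buf = list(text)
--     i = 0
--     n = len(text)
--
--     while i < n:
--         c = text[i]
--
--         # Line comment  //
--         if c == '/' and i + 1 < n and text[i + 1] == '/':
--             while i < n and text[i] != '\n':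
--                 buf[i] = ' '
--                 i += 1
--
--         # Block comment  /* … */
--         elif c == '/' and i + 1 < n and text[i + 1] == '*':
--             buf[i] = buf[i + 1] = ' '
--             i += 2
--             while i < n:
--                 if text[i] == '*' and i + 1 < n and text[i + 1] == '/':
--                     buf[i] = buf[i + 1] = ' '
--                     i += 2
--                     break
--                 if text[i] != '\n':
--                     buf[i] = ' '
--                 i += 1
--
--         # String literal  "…"
--         elif c == '"':
--             buf[i] = ' '
--             i += 1
--             while i < n and text[i] != '\n':
--                 if text[i] == '\\':        # escaped character
--                     buf[i] = ' '
--                     i += 1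
--                     if i < n:
--                         buf[i] = ' '
--                         i += 1
--                 elif text[i] == '"':
--                     buf[i] = ' '
--                     i += 1
--                     break
--                 else:
--                     buf[i] = ' '
--                     i += 1
--
--         # Char literal  '…'
--         elif c == "'":
--             buf[i] = ' '
--             i += 1
--             while i < n and text[i] != '\n':
--                 if text[i] == '\\':
--                     buf[i] = ' '
--                     i += 1
--                     if i < n:
--                         buf[i] = ' '
--                         i += 1
--                 elif text[i] == "'":
--                     buf[i] = ' '
--                     i += 1
--                     break
--                 else:
--                     buf[i] = ' '
--                     i += 1
--
--         else:
--             i += 1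
--
--     return ''.join(buf)
-- ===== SOURCE B (Python) =====
-- NORMAL, SLASH, LINE, BLOCK, BLOCK_STAR, STRING, STRING_ESC, CHAR, CHAR_ESC = range(9)
--
--
-- def mask_literals(text: str) -> str:
--     """Flat single-pass scanner: one explicit state variable, one character
--     per iteration (SLASH/BLOCK_STAR re-dispatch the current character
--     without advancing)."""
--     out = []
--     state = NORMAL
--     i = 0
--     n = len(text)
--     while i < n:
--         c = text[i]
--         if state == NORMAL:
--             if c == '/':
--                 state = SLASH          # emit nothing yet
--             elif c == '"':
--                 out.append(' ')
--                 state = STRING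
--             elif c == "'":
--                 out.append(' ')
--                 state = CHAR
--             else:
--                 out.append(c)
--         elif state == SLASH:
--             if c == '/':
--                 out.append(' ')
--                 out.append(' ')
--                 state = LINE
--             elif c == '*':
--                 out.append(' ')
--                 out.append(' ')
--                 state = BLOCK
--             else:
--                 out.append('/')        # the pending slash was ordinary
--                 state = NORMAL
--                 continue               # re-dispatch c in NORMAL
--         elif state == LINE:
--             if c == '\n':
--                 out.append('\n')
--                 state = NORMAL
--             else:
--                 out.append(' ')
--         elif state == BLOCK:
--             if c == '*':
--                 out.append(' ')
--                 state = BLOCK_STAR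
--             elif c == '\n':
--                 out.append('\n')
--             else:
--                 out.append(' ')
--         elif state == BLOCK_STAR:
--             if c == '/':
--                 out.append(' ')
--                 state = NORMAL
--             else:
--                 state = BLOCK
--                 continue               # re-dispatch c in BLOCK
--         elif state == STRING:
--             if c == '\n':
--                 out.append('\n')
--                 state = NORMAL
--             elif c == '\\':
--                 out.append(' ')
--                 state = STRING_ESC
--             elif c == '"':
--                 out.append(' ')
--                 state = NORMAL
--             else:
--                 out.append(' ')
--         elif state == STRING_ESC:
--             out.append(' ')            # escaped char masked unconditionally
--             state = STRING
--         elif state == CHAR: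
--             if c == '\n':
--                 out.append('\n')
--                 state = NORMAL
--             elif c == '\\':
--                 out.append(' ')
--                 state = CHAR_ESC
--             elif c == "'":
--                 out.append(' ')
--                 state = NORMAL
--             else:
--                 out.append(' ')
--         else:  # CHAR_ESC
--             out.append(' ')
--             state = CHAR
--         i += 1
--     if state == SLASH:                 # pending slash at end of input
--         out.append('/')
--     return ''.join(out)
-- ===== Notes on version B (the rewrite author's own statement) =====
-- stated objective: idiomatic
-- what changed: A's outer loop with four nested masking while-loops (and a two-character lookahead) is replaced by a single flat one-character-per-step state machine with an explicit scanner state (NORMAL/SLASH/LINE/BLOCK/BLOCK_STAR/STRING/STRING_ESC/CHAR/CHAR_ESC), where pending '/' and '*' are handled by state instead of lookahead.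
import Mathlib
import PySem

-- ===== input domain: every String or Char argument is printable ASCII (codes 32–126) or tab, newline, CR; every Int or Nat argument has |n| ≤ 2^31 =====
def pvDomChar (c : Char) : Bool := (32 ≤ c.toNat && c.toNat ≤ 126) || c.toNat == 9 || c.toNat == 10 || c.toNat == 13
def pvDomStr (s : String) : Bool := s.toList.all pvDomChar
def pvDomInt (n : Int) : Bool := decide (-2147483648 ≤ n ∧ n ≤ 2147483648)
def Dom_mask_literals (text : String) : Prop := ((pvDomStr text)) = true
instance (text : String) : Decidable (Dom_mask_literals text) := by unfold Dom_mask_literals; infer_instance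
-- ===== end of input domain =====

-- B rewrites A's nested while-loops as one flat per-character state machine (objective: idiomatic decomposition, same cost).

-- ===== PORT A =====
-- A's outer while-loop with its four inner masking loops, as mutual recursion
-- over the remaining character list (the index i only ever moves forward and
-- buf is only written at already-passed positions, so emitting output while
-- consuming the list is the same computation).
mutual
def pvMainA : List Char → List Char
  | [] => []
  | c :: rest =>
    if c = '/' then
      match rest with
      | [] => '/' :: pvMainA []                      -- i+1 < n fails: else-branch
      | b :: r =>
        if b = '/' then ' ' :: ' ' :: pvLineA r      -- line comment: loop masks both slashes first
        else if b = '*' then ' ' :: ' ' :: pvBlockA r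
        else '/' :: pvMainA (b :: r)                 -- else-branch: lone '/'
    else if c = '"' then ' ' :: pvStrA rest
    else if c = '\'' then ' ' :: pvChrA rest
    else c :: pvMainA rest

-- line-comment loop: masks until '\n'; the '\n' itself is handled by the outer loop's else-branch
def pvLineA : List Char → List Char
  | [] => []
  | c :: rest => if c = '\n' then '\n' :: pvMainA rest else ' ' :: pvLineA rest

def pvBlockA : List Char → List Char
  | [] => []
  | c :: rest =>
    if c = '*' then
      match rest with
      | [] => ' ' :: pvBlockA []                     -- '*' ≠ '\n': masked, loop ends
      | b :: r =>
        if b = '/' then ' ' :: ' ' :: pvMainA r      -- "*/": mask both, break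
        else ' ' :: pvBlockA (b :: r)
    else if c = '\n' then '\n' :: pvBlockA rest
    else ' ' :: pvBlockA rest

def pvStrA : List Char → List Char
  | [] => []
  | c :: rest =>
    if c = '\n' then '\n' :: pvMainA rest            -- loop guard fails; outer loop's else-branch takes '\n'
    else if c = '\\' then
      ' ' :: (match rest with
              | [] => []
              | _ :: r => ' ' :: pvStrA r)           -- escaped char masked unconditionally
    else if c = '"' then ' ' :: pvMainA rest         -- closing quote: mask, break
    else ' ' :: pvStrA rest

def pvChrA : List Char → List Char
  | [] => []
  | c :: rest =>
    if c = '\n' then '\n' :: pvMainA rest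
    else if c = '\\' then
      ' ' :: (match rest with
              | [] => []
              | _ :: r => ' ' :: pvChrA r)
    else if c = '\'' then ' ' :: pvMainA rest
    else ' ' :: pvChrA rest
end

def mask_literals (text : String) : String := String.ofList (pvMainA text.toList)

-- ===== PORT B =====
inductive PvSt where
  | norm | slash | line | blk | blkStar | str | strEsc | chr | chrEsc
deriving DecidableEq, Repr

-- SLASH and BLOCK_STAR re-dispatch the current character without consuming it
-- (Source B's `continue` without `i += 1`); this rank makes that terminate.
def pvRank : PvSt → Nat
  | .slash => 1
  | .blkStar => 1
  | _ => 0

-- the flat while-loop of Source B: one state, one character per step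
def pvRun : PvSt → List Char → List Char
  | .slash, [] => ['/']                              -- pending slash at end of input
  | _, [] => []
  | .norm, c :: cs =>
    if c = '/' then pvRun .slash cs
    else if c = '"' then ' ' :: pvRun .str cs
    else if c = '\'' then ' ' :: pvRun .chr cs
    else c :: pvRun .norm cs
  | .slash, c :: cs =>
    if c = '/' then ' ' :: ' ' :: pvRun .line cs
    else if c = '*' then ' ' :: ' ' :: pvRun .blk cs
    else '/' :: pvRun .norm (c :: cs)                -- re-dispatch c in NORMAL
  | .line, c :: cs => if c = '\n' then '\n' :: pvRun .norm cs else ' ' :: pvRun .line cs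
  | .blk, c :: cs =>
    if c = '*' then ' ' :: pvRun .blkStar cs
    else if c = '\n' then '\n' :: pvRun .blk cs
    else ' ' :: pvRun .blk cs
  | .blkStar, c :: cs =>
    if c = '/' then ' ' :: pvRun .norm cs
    else pvRun .blk (c :: cs)                        -- re-dispatch c in BLOCK
  | .str, c :: cs =>
    if c = '\n' then '\n' :: pvRun .norm cs
    else if c = '\\' then ' ' :: pvRun .strEsc cs
    else if c = '"' then ' ' :: pvRun .norm cs
    else ' ' :: pvRun .str cs
  | .strEsc, _ :: cs => ' ' :: pvRun .str cs
  | .chr, c :: cs =>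
    if c = '\n' then '\n' :: pvRun .norm cs
    else if c = '\\' then ' ' :: pvRun .chrEsc cs
    else if c = '\'' then ' ' :: pvRun .norm cs
    else ' ' :: pvRun .chr cs
  | .chrEsc, _ :: cs => ' ' :: pvRun .chr cs
termination_by s cs => (cs.length, pvRank s)
decreasing_by all_goals (simp_wf; simp [pvRank]; omega)

def mask_literals_alt (text : String) : String := String.ofList (pvRun .norm text.toList)

-- ===== PRECONDITION & SPEC =====
def Spec_mask_literals (text : String) (out : String) : Prop := out = mask_literals_alt text
instance (text : String) (out : String) : Decidable (Spec_mask_literals text out) := by unfold Spec_mask_literals; infer_instance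

-- ===== CLAIM (what is proved, stated in full; the proofs are below) =====
def Claim_equal_mask_literals : Prop := ∀ (text : String), Dom_mask_literals text → Spec_mask_literals text (mask_literals text)

-- ===== LEMMAS AND PROOFS =====

-- one-step unfoldings for the A-port functions whose equations split on the
-- second character (because of their lookahead match)
theorem pvMainA_cons (c : Char) (rest : List Char) :
    pvMainA (c :: rest) =
      if c = '/' then
        (match rest with
         | [] => '/' :: pvMainA []
         | b :: r =>
           if b = '/' then ' ' :: ' ' :: pvLineA r
           else if b = '*' then ' ' :: ' ' :: pvBlockA r
           else '/' :: pvMainA (b :: r))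
      else if c = '"' then ' ' :: pvStrA rest
      else if c = '\'' then ' ' :: pvChrA rest
      else c :: pvMainA rest := by
  cases rest <;> rfl

theorem pvBlockA_cons (c : Char) (rest : List Char) :
    pvBlockA (c :: rest) =
      if c = '*' then
        (match rest with
         | [] => ' ' :: pvBlockA []
         | b :: r =>
           if b = '/' then ' ' :: ' ' :: pvMainA r
           else ' ' :: pvBlockA (b :: r))
      else if c = '\n' then '\n' :: pvBlockA rest
      else ' ' :: pvBlockA rest := by
  cases rest <;> rfl

theorem pvStrA_cons (c : Char) (rest : List Char) :
    pvStrA (c :: rest) =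
      if c = '\n' then '\n' :: pvMainA rest
      else if c = '\\' then
        ' ' :: (match rest with
                | [] => []
                | _ :: r => ' ' :: pvStrA r)
      else if c = '"' then ' ' :: pvMainA rest
      else ' ' :: pvStrA rest := by
  cases rest <;> rfl

theorem pvChrA_cons (c : Char) (rest : List Char) :
    pvChrA (c :: rest) =
      if c = '\n' then '\n' :: pvMainA rest
      else if c = '\\' then
        ' ' :: (match rest with
                | [] => []
                | _ :: r => ' ' :: pvChrA r)
      else if c = '\'' then ' ' :: pvMainA rest
      else ' ' :: pvChrA rest := by
  cases rest <;> rfl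

theorem pvRun_eq_A : ∀ (n : Nat) (cs : List Char), cs.length ≤ n →
    pvRun .norm cs = pvMainA cs ∧ pvRun .line cs = pvLineA cs ∧
    pvRun .blk cs = pvBlockA cs ∧ pvRun .str cs = pvStrA cs ∧
    pvRun .chr cs = pvChrA cs := by
  intro n
  induction n with
  | zero =>
    intro cs h
    have : cs = [] := by cases cs <;> simp_all
    subst this
    simp [pvRun, pvMainA, pvLineA, pvBlockA, pvStrA, pvChrA]
  | succ n ih =>
    intro cs h
    match cs with
    | [] => simp [pvRun, pvMainA, pvLineA, pvBlockA, pvStrA, pvChrA]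
    | a :: as =>
      have has : as.length ≤ n := by simp at h; omega
      have ihas := ih as has
      refine ⟨?_, ?_, ?_, ?_, ?_⟩
      · -- norm = mainA
        by_cases ha : a = '/'
        · subst ha
          match as with
          | [] => simp [pvRun, pvMainA]
          | b :: r =>
            have hr : r.length ≤ n := by simp at h; omega
            have ihr := ih r hr
            by_cases hb : b = '/'
            · subst hb; simp [pvRun, pvMainA, ihr.2.1]
            · by_cases hb2 : b = '*'
              · subst hb2; simp [pvRun, pvMainA, ihr.2.2.1]
              · simp [pvRun, pvMainA, hb, hb2, ihas.1, pvMainA_cons]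
        · by_cases ha2 : a = '"'
          · subst ha2; simp [pvRun, ihas.2.2.2.1, pvMainA_cons]
          · by_cases ha3 : a = '\''
            · subst ha3; simp [pvRun, ihas.2.2.2.2, pvMainA_cons]
            · simp [pvRun, ha, ha2, ha3, ihas.1, pvMainA_cons]
      · -- line
        by_cases ha : a = '\n'
        · subst ha; simp [pvRun, pvLineA, ihas.1]
        · simp [pvRun, pvLineA, ha, ihas.2.1]
      · -- blk
        by_cases ha : a = '*'
        · subst ha
          match as with
          | [] => simp [pvRun, pvBlockA]
          | b :: r =>
            have hr : r.length ≤ n := by simp at h; omega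
            have ihr := ih r hr
            by_cases hb : b = '/'
            · subst hb; simp [pvRun, pvBlockA, ihr.1]
            · by_cases hb2 : b = '\n'
              · subst hb2; simp [pvRun, pvBlockA, hb, ihas.2.2.1, pvBlockA_cons]
              · have h1 : pvRun PvSt.blk ('*' :: b :: r) = ' ' :: pvRun PvSt.blkStar (b :: r) := by
                  simp [pvRun]
                have h2 : pvRun PvSt.blkStar (b :: r) = pvRun PvSt.blk (b :: r) := by
                  simp [pvRun, hb]
                have h3 : pvBlockA ('*' :: b :: r) = ' ' :: pvBlockA (b :: r) := by
                  simp [pvBlockA, hb]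
                rw [h1, h2, ihas.2.2.1, h3]
        · by_cases ha2 : a = '\n'
          · subst ha2; simp [pvRun, ha, ihas.2.2.1, pvBlockA_cons]
          · simp [pvRun, ha, ha2, ihas.2.2.1, pvBlockA_cons]
      · -- str
        by_cases ha : a = '\n'
        · subst ha; simp [pvRun, ihas.1, pvStrA_cons]
        · by_cases ha2 : a = '\\'
          · subst ha2
            match as with
            | [] => simp [pvRun, pvStrA]
            | b :: r =>
              have hr : r.length ≤ n := by simp at h; omega
              simp [pvRun, pvStrA, (ih r hr).2.2.2.1]
          · by_cases ha3 : a = '"'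
            · subst ha3; simp [pvRun, ihas.1, pvStrA_cons]
            · simp [pvRun, ha, ha2, ha3, ihas.2.2.2.1, pvStrA_cons]
      · -- chr
        by_cases ha : a = '\n'
        · subst ha; simp [pvRun, ihas.1, pvChrA_cons]
        · by_cases ha2 : a = '\\'
          · subst ha2
            match as with
            | [] => simp [pvRun, pvChrA]
            | b :: r =>
              have hr : r.length ≤ n := by simp at h; omega
              simp [pvRun, pvChrA, (ih r hr).2.2.2.2]
          · by_cases ha3 : a = '\''
            · subst ha3; simp [pvRun, ihas.1, pvChrA_cons]
            · simp [pvRun, ha, ha2, ha3, ihas.2.2.2.2, pvChrA_cons]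

-- ===== VERDICT (by name: the statement is the Claim_ definition above) =====
theorem mask_literals_spec : Claim_equal_mask_literals := by
  intro text _
  unfold Spec_mask_literals mask_literals mask_literals_alt
  rw [(pvRun_eq_A text.toList.length text.toList le_rfl).1]
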